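-- pv_equiv track=rewrite | github.com/ama10047/Reproducbility-Challenge-SCC23 | sbc.py | sbc_extended
-- ===== SOURCE A (Python) =====
-- from copy import deepcopy
--
-- def sbc_base(r):
--     result = [ [None for _ in range(r)] for _ in range(r) ]
--     count = 0
--     for i in range(r):
--         for j in range(i):
--             result[i][j] = count
--             result[j][i] = count
--             count += 1
--     return result
--
-- def sbc_extended(r):
--     base = sbc_base(r)
--     diags = []
--
--     # Base case, valid both for even and odd r
--     for l in range(1, 1 + (r-1)//2):
--         diag = [None] * r
--         for k in range(r-l):
--             diag[k] = base[k][l + k]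
--         for k in range(l):
--             diag[r+k-l] = base[k][r + k - l]
--         diags.append(diag)
--
--     # Special case for even r
--     if r % 2 == 0:
--         l = r//2
--         bonus_pack = [None] * l
--         for k in range(l):
--             bonus_pack[k] = base[k][l + k]
--
--         left_packs =  [bonus_pack] + [ diag[:l] for diag in diags ]
--         right_packs = [ diag[l:] for diag in diags ] + [bonus_pack]
--
--         diags.extend( a + b for (a, b) in zip(left_packs, right_packs) )
--
--     # Making the patterns
--     def make_pattern(diag):
--         result = deepcopy(base)
--         for k in range(r):
--             result[k][k] = diag[k]
--         return result
--
--     return [ make_pattern(d) for d in diags ]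
-- ===== SOURCE B (Python) =====
-- def sbc_extended(r):
--     # Point-wise closed form: every entry of every output matrix is computed directly
--     # from its indices (m, i, j); no base matrix, no diagonal lists, no deepcopy, no splicing.
--     def entry(m, i, j):
--         if i == j:
--             half = (r - 1) // 2
--             if m < half:
--                 o = m + 1                       # plain diagonal with offset m+1
--             elif i < r // 2:
--                 o = r // 2 if m == half else m - half   # left half of a spliced diagonal
--             else:
--                 o = m - half + 1                # right half of a spliced diagonal
--             j = (i + o) % r                     # partner of i on that diagonal
--         hi, lo = (i, j) if i > j else (j, i)
--         return hi * (hi - 1) // 2 + lo          # canonical index of the unordered pair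
--     nd = max((r - 1) // 2, 0)
--     if r % 2 == 0:
--         nd += max((r - 1) // 2, 0) + 1
--     return [[[entry(m, i, j) for j in range(r)] for i in range(r)] for m in range(nd)]
-- ===== Notes on version B (the rewrite author's own statement) =====
-- stated objective: alternative
-- what changed: Replaces A's staged construction (count-filled shared base matrix, per-offset diagonal extraction loops, slice/zip splicing of halves, deepcopy-and-overwrite patterns) by a single point-wise closed form: every entry of every output matrix is computed directly from its indices (m,i,j) via the triangular pair-index formula and a piecewise diagonal-offset function; no intermediate matrix or diagonal list is ever built.
import Mathlib
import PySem

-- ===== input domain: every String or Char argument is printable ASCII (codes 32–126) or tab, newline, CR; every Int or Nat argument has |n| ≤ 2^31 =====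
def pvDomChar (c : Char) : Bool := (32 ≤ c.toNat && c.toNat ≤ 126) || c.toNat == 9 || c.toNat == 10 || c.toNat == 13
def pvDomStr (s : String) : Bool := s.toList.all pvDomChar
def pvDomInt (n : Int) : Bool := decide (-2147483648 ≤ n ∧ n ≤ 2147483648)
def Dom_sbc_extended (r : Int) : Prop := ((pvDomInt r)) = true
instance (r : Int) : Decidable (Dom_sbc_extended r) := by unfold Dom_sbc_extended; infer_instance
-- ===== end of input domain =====

-- B computes every entry of every output matrix point-wise from its indices via the triangular
-- pair-index closed form and a piecewise diagonal-offset function (alternative construction;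
-- similar cost).


-- ===== PORT A =====
-- helper sbc_base: indices written by the loops are produced by range(), hence nonnegative and
-- in range, so the total forms pyGetD/pySetD are exact here.
def sbc_base (r : Int) : List (List (Option Int)) :=
  let result : List (List (Option Int)) :=
    (PySem.List.pyRange 0 r 1).map (fun _ =>
      (PySem.List.pyRange 0 r 1).map (fun _ => (none : Option Int)))
  let st :=
    (PySem.List.pyRange 0 r 1).foldl (fun st i =>
      (PySem.List.pyRange 0 i 1).foldl (fun st j =>
        let m1 := PySem.List.pySetD st.1 i
          (PySem.List.pySetD (PySem.List.pyGetD st.1 i []) j (some st.2))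
        let m2 := PySem.List.pySetD m1 j
          (PySem.List.pySetD (PySem.List.pyGetD m1 j []) i (some st.2))
        (m2, st.2 + 1)) st) (result, (0 : Int))
  st.1

def sbc_extended (r : Int) : List (List (List (Option Int))) :=
  let base := sbc_base r
  let diags : List (List (Option Int)) :=
    (PySem.List.pyRange 1 (1 + PySem.Int.floordiv (r - 1) 2) 1).foldl (fun diags l =>
      let diag : List (Option Int) := PySem.List.pyRepeat [(none : Option Int)] r
      let diag := (PySem.List.pyRange 0 (r - l) 1).foldl (fun diag k =>
        PySem.List.pySetD diag k
          (PySem.List.pyGetD (PySem.List.pyGetD base k []) (l + k) none)) diag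
      let diag := (PySem.List.pyRange 0 l 1).foldl (fun diag k =>
        PySem.List.pySetD diag (r + k - l)
          (PySem.List.pyGetD (PySem.List.pyGetD base k []) (r + k - l) none)) diag
      diags ++ [diag]) []
  let diags :=
    if PySem.Int.mod r 2 == 0 then
      let l := PySem.Int.floordiv r 2
      let bonus : List (Option Int) := PySem.List.pyRepeat [(none : Option Int)] l
      let bonus := (PySem.List.pyRange 0 l 1).foldl (fun b k =>
        PySem.List.pySetD b k
          (PySem.List.pyGetD (PySem.List.pyGetD base k []) (l + k) none)) bonus
      let left_packs := [bonus] ++ diags.map (fun d => PySem.List.slice d none (some l))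
      let right_packs := diags.map (fun d => PySem.List.slice d (some l) none) ++ [bonus]
      diags ++ (left_packs.zip right_packs).map (fun ab => ab.1 ++ ab.2)
    else diags
  diags.map (fun d =>
    -- make_pattern: deepcopy(base) is base itself (pure lists), then the diagonal is overwritten
    (PySem.List.pyRange 0 r 1).foldl (fun res k =>
      PySem.List.pySetD res k
        (PySem.List.pySetD (PySem.List.pyGetD res k []) k (PySem.List.pyGetD d k none))) base)

-- ===== PORT B =====
def sbc_extended_alt (r : Int) : List (List (List (Option Int))) :=
  let entry : Int → Int → Int → Int := fun m i j =>
    let j :=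
      if i == j then
        let half := PySem.Int.floordiv (r - 1) 2
        let o :=
          if m < half then m + 1
          else if i < PySem.Int.floordiv r 2 then
            (if m == half then PySem.Int.floordiv r 2 else m - half)
          else m - half + 1
        PySem.Int.mod (i + o) r
      else j
    let hilo := if i > j then (i, j) else (j, i)
    PySem.Int.floordiv (hilo.1 * (hilo.1 - 1)) 2 + hilo.2
  let nd := max (PySem.Int.floordiv (r - 1) 2) 0
  let nd := if PySem.Int.mod r 2 == 0 then nd + (max (PySem.Int.floordiv (r - 1) 2) 0 + 1) else nd
  (PySem.List.pyRange 0 nd 1).map (fun m =>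
    (PySem.List.pyRange 0 r 1).map (fun i =>
      (PySem.List.pyRange 0 r 1).map (fun j => some (entry m i j))))

-- ===== PRECONDITION & SPEC =====
def Spec_sbc_extended (r : Int) (out : List (List (List (Option Int)))) : Prop := out = sbc_extended_alt r
instance (r : Int) (out : List (List (List (Option Int)))) : Decidable (Spec_sbc_extended r out) := by unfold Spec_sbc_extended; infer_instance

-- ===== CLAIM (what is proved, stated in full; the proofs are below) =====
def Claim_equal_sbc_extended : Prop := ∀ (r : Int), Dom_sbc_extended r → Spec_sbc_extended r (sbc_extended r)

-- ===== LEMMAS AND PROOFS =====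

def rmap {α : Type} (n : Nat) (f : Nat → α) : List α := (List.range n).map f
def pvPair (p q : Int) : Int := PySem.Int.floordiv (max p q * (max p q - 1)) 2 + min p q
def pvMat (n : Nat) (F : Nat → Nat → Option Int) : List (List (Option Int)) := rmap n (fun i => rmap n (F i))

-- the piecewise diagonal offset B uses (mirrors the port's entry helper)
def pvOff (r m i : Int) : Int :=
  if m < PySem.Int.floordiv (r - 1) 2 then m + 1
  else if i < PySem.Int.floordiv r 2 then
    (if m == PySem.Int.floordiv (r - 1) 2 then PySem.Int.floordiv r 2
     else m - PySem.Int.floordiv (r - 1) 2)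
  else m - PySem.Int.floordiv (r - 1) 2 + 1

theorem length_rmap {α : Type} (n : Nat) (f : Nat → α) : (rmap n f).length = n := by
  simp [rmap]

theorem getElem_rmap {α : Type} (n : Nat) (f : Nat → α) (k : Nat) (hk : k < (rmap n f).length) :
    (rmap n f)[k] = f k := by
  simp [rmap] at hk ⊢

theorem rmap_congr {α : Type} {n : Nat} {f g : Nat → α} (h : ∀ x, x < n → f x = g x) :
    rmap n f = rmap n g := by
  apply List.map_congr_left
  intro x hx
  exact h x (List.mem_range.mp hx)

theorem rmap_append {α : Type} (a b : Nat) (f : Nat → α) :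
    rmap (a + b) f = rmap a f ++ rmap b (fun k => f (a + k)) := by
  simp [rmap, List.range_add, List.map_map]

theorem pyRange_cast (a b : Int) : PySem.List.pyRange a b 1 = rmap (b - a).toNat (fun k => a + k) := by
  rw [PySem.List.pyRange_one]; rfl

theorem pyRange_zero_cast (b : Int) : PySem.List.pyRange 0 b 1 = rmap b.toNat (fun k => (k : Int)) := by
  rw [pyRange_cast]; simp [rmap]

theorem get_rmap {α : Type} (n : Nat) (f : Nat → α) (k : Nat) (hk : k < n) (d : α) :
    PySem.List.pyGetD (rmap n f) (k : Int) d = f k := by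
  rw [PySem.List.pyGetD_natCast]
  rw [List.getD_eq_getElem?_getD]
  rw [List.getElem?_eq_getElem (by simpa [length_rmap] using hk)]
  simp [getElem_rmap n f k (by simpa [length_rmap] using hk)]

theorem set_rmap {α : Type} (n : Nat) (f : Nat → α) (k : Nat) (v : α) :
    PySem.List.pySetD (rmap n f) (k : Int) v = rmap n (fun x => if x = k then v else f x) := by
  rw [PySem.List.pySetD_natCast]
  apply List.ext_getElem
  · simp [length_rmap]
  · intro i h1 h2
    rw [List.getElem_set]
    rw [getElem_rmap _ _ i h2]
    rcases eq_or_ne k i with h | h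
    · simp [h]
    · simp [h, Ne.symm h, getElem_rmap]

theorem pvMat_congr {n : Nat} {F G : Nat → Nat → Option Int}
    (h : ∀ x, x < n → ∀ y, y < n → F x y = G x y) : pvMat n F = pvMat n G := by
  apply rmap_congr
  intro x hx
  exact rmap_congr (h x hx)

theorem setm (n : Nat) (F : Nat → Nat → Option Int) (a b : Nat) (ha : a < n) (v : Option Int) :
    PySem.List.pySetD (pvMat n F) (a : Int)
      (PySem.List.pySetD (PySem.List.pyGetD (pvMat n F) (a : Int) []) (b : Int) v)
    = pvMat n (fun x y => if x = a ∧ y = b then v else F x y) := by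
  unfold pvMat
  rw [get_rmap n _ a ha, set_rmap, set_rmap]
  apply rmap_congr
  intro x hx
  rcases eq_or_ne x a with h | h
  · subst h
    rw [if_pos rfl]
    apply rmap_congr
    intro y hy
    by_cases hyb : y = b <;> simp [hyb]
  · simp only [if_neg h]
    apply rmap_congr
    intro y hy
    simp [h]

theorem fill {α : Type} (N o m : Nat) (h : o + m ≤ N) (f : Nat → α) (hv : Nat → α) :
    (List.range m).foldl (fun acc (k : Nat) => PySem.List.pySetD acc ((o : Int) + (k : Int)) (hv k)) (rmap N f)
    = rmap N (fun x => if o ≤ x ∧ x < o + m then hv (x - o) else f x) := by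
  induction m with
  | zero => simp; apply rmap_congr; intro x hx; rw [if_neg (by omega)]
  | succ m ih =>
    rw [List.range_succ, List.foldl_append, ih (by omega)]
    simp only [List.foldl_cons, List.foldl_nil]
    have : ((o : Int) + (m : Int)) = ((o + m : Nat) : Int) := by push_cast; ring
    rw [this, set_rmap]
    apply rmap_congr
    intro x hx
    by_cases hx1 : x = o + m
    · subst hx1; rw [if_pos rfl, if_pos (by omega)]; congr 1; omega
    · rw [if_neg hx1]
      by_cases hx2 : o ≤ x ∧ x < o + m
      · rw [if_pos hx2, if_pos (by omega)]
      · rw [if_neg hx2, if_neg (by omega)]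

theorem innerLoop (N a : Nat) (ha : a < N) (m : Nat) (hm : m ≤ a) (F : Nat → Nat → Option Int) (c : Int) :
    (List.range m).foldl (fun st (j : Nat) =>
        (PySem.List.pySetD
            (PySem.List.pySetD st.1 (a : Int)
              (PySem.List.pySetD (PySem.List.pyGetD st.1 (a : Int) []) (j : Int) (some st.2)))
            (j : Int)
            (PySem.List.pySetD
              (PySem.List.pyGetD
                (PySem.List.pySetD st.1 (a : Int)
                  (PySem.List.pySetD (PySem.List.pyGetD st.1 (a : Int) []) (j : Int) (some st.2)))
                (j : Int) [])
              (a : Int) (some st.2)),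
          st.2 + 1))
      (pvMat N F, c)
    = (pvMat N (fun x y =>
        if x = a ∧ y < m then some (c + (y : Int))
        else if y = a ∧ x < m then some (c + (x : Int))
        else F x y), c + (m : Int)) := by
  induction m generalizing F with
  | zero =>
    simp only [List.range_zero, List.foldl_nil, Nat.cast_zero, add_zero]
    refine Prod.ext ?_ ?_
    · apply pvMat_congr; intro x hx y hy; rw [if_neg (by omega), if_neg (by omega)]
    · rfl
  | succ m ih =>
    rw [List.range_succ, List.foldl_append]
    rw [ih (by omega)]
    simp only [List.foldl_cons, List.foldl_nil]
    rw [setm N _ a m ha, setm N _ m a (by omega)]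
    refine Prod.ext ?_ ?_
    · apply pvMat_congr
      intro x hx y hy
      split_ifs <;> simp_all <;> omega
    · push_cast; ring

def pvTri : Nat → Int
  | 0 => 0
  | m + 1 => pvTri m + m

theorem pvTri_eq (m : Nat) : pvTri m = PySem.Int.floordiv ((m : Int) * ((m : Int) - 1)) 2 := by
  rw [PySem.Int.floordiv_eq_ediv_of_pos (by norm_num)]
  induction m with
  | zero => simp [pvTri]
  | succ m ih =>
    rw [pvTri, ih]
    have h : ((m + 1 : Nat) : Int) * (((m + 1 : Nat) : Int) - 1) = (m : Int) * ((m : Int) - 1) + (m : Int) * 2 := by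
      push_cast; ring
    rw [h, Int.add_mul_ediv_right _ _ (by norm_num)]

theorem pvPair_eq_tri (a y : Nat) (h : y < a) : pvPair (a : Int) (y : Int) = pvTri a + (y : Int) := by
  unfold pvPair
  rw [pvTri_eq]
  rw [max_eq_left (by exact_mod_cast h.le), min_eq_right (by exact_mod_cast h.le)]

theorem pvPair_comm (p q : Int) : pvPair p q = pvPair q p := by
  unfold pvPair
  rw [max_comm, min_comm]

theorem foldl_rmap {α β : Type} (n : Nat) (g : Nat → α) (f : β → α → β) (init : β) :
    (rmap n g).foldl f init = (List.range n).foldl (fun acc k => f acc (g k)) init := by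
  simp [rmap, List.foldl_map]

theorem map_rmap {α β : Type} (n : Nat) (g : Nat → α) (f : α → β) :
    (rmap n g).map f = rmap n (fun k => f (g k)) := by
  simp [rmap, List.map_map]

theorem outerLoop (N m : Nat) (hm : m ≤ N) :
    (List.range m).foldl (fun st (i : Nat) =>
      (List.range i).foldl (fun st (j : Nat) =>
        (PySem.List.pySetD
            (PySem.List.pySetD st.1 (i : Int)
              (PySem.List.pySetD (PySem.List.pyGetD st.1 (i : Int) []) (j : Int) (some st.2)))
            (j : Int)
            (PySem.List.pySetD
              (PySem.List.pyGetD
                (PySem.List.pySetD st.1 (i : Int)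
                  (PySem.List.pySetD (PySem.List.pyGetD st.1 (i : Int) []) (j : Int) (some st.2)))
                (j : Int) [])
              (i : Int) (some st.2)),
          st.2 + 1)) st)
      (pvMat N (fun _ _ => (none : Option Int)), (0 : Int))
    = (pvMat N (fun x y => if x < m ∧ y < m ∧ x ≠ y then some (pvPair (x : Int) (y : Int)) else none),
       pvTri m) := by
  induction m with
  | zero =>
    simp only [List.range_zero, List.foldl_nil, pvTri]
    refine Prod.ext ?_ ?_
    · apply pvMat_congr; intro x hx y hy; rw [if_neg (by omega)]
    · rfl
  | succ m ih =>
    rw [List.range_succ, List.foldl_append, ih (by omega)]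
    simp only [List.foldl_cons, List.foldl_nil]
    rw [innerLoop N m (by omega) m le_rfl _ (pvTri m)]
    refine Prod.ext ?_ ?_
    · apply pvMat_congr
      intro x hx y hy
      by_cases h1 : x = m ∧ y < m
      · rw [if_pos h1, if_pos (by omega)]
        rw [h1.1, pvPair_eq_tri m y h1.2]
      · rw [if_neg h1]
        by_cases h2 : y = m ∧ x < m
        · rw [if_pos h2, if_pos (by omega)]
          rw [h2.1, pvPair_comm, pvPair_eq_tri m x h2.2]
        · rw [if_neg h2]
          by_cases h3 : x < m ∧ y < m ∧ x ≠ y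
          · rw [if_pos h3, if_pos (by omega)]
          · rw [if_neg h3, if_neg (by omega)]
    · simp [pvTri]

theorem base_eq (r : Int) :
    sbc_base r = pvMat r.toNat (fun x y => if x = y then none else some (pvPair (x : Int) (y : Int))) := by
  simp only [sbc_base, pyRange_zero_cast, Int.toNat_natCast, foldl_rmap, map_rmap]
  rw [show (rmap r.toNat fun _ => rmap r.toNat fun _ => (none : Option Int)) = pvMat r.toNat (fun _ _ => none) from rfl]
  rw [outerLoop r.toNat r.toNat le_rfl]
  apply pvMat_congr
  intro x hx y hy
  by_cases h : x = y
  · rw [if_neg (by omega), if_pos h]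
  · rw [if_pos (by omega), if_neg h]

theorem rmap_const {α : Type} (n : Nat) (c : α) : rmap n (fun _ => c) = List.replicate n c := by
  simp [rmap, List.map_const']

theorem get_rmapI {α : Type} (n : Nat) (f : Nat → α) (i : Int) (h0 : 0 ≤ i) (h : i < (n : Int)) (d : α) :
    PySem.List.pyGetD (rmap n f) i d = f i.toNat := by
  have hi : i = ((i.toNat : Nat) : Int) := by omega
  rw [hi, get_rmap n f i.toNat (by omega)]
  congr 1

theorem getm (n : Nat) (F : Nat → Nat → Option Int) (a : Nat) (ha : a < n) :
    PySem.List.pyGetD (pvMat n F) (a : Int) [] = rmap n (F a) := by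
  exact get_rmap n _ a ha []

theorem pvmod_lo (a r : Int) (h0 : 0 ≤ a) (h : a < r) : PySem.Int.mod a r = a := by
  rw [PySem.Int.mod_eq_emod_of_pos (by omega)]
  exact Int.emod_eq_of_lt h0 h

theorem pvmod_hi (a r : Int) (h0 : r ≤ a) (h : a < 2 * r) : PySem.Int.mod a r = a - r := by
  have hr : 0 < r := by omega
  rw [PySem.Int.mod_eq_emod_of_pos hr]
  rw [Int.emod_eq_sub_self_emod]
  exact Int.emod_eq_of_lt (by omega) (by omega)

theorem fillGen {α : Type} (N m o : Nat) (h : o + m ≤ N) (f : Nat → α)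
    (step : List α → Nat → List α) (hv : Nat → α)
    (hstep : ∀ acc (k : Nat), k < m → step acc k = PySem.List.pySetD acc ((o : Int) + (k : Int)) (hv k)) :
    (List.range m).foldl step (rmap N f)
    = rmap N (fun x => if o ≤ x ∧ x < o + m then hv (x - o) else f x) := by
  refine Eq.trans (PySem.List.foldl_congr_mem _ _ _ _ ?_) (fill N o m h f hv)
  intro acc x hx
  exact hstep acc x (List.mem_range.mp hx)

theorem diagA_eq (r l : Int) (hl1 : 1 ≤ l) (hl2 : l < r) :
    (PySem.List.pyRange 0 l 1).foldl
      (fun diag k => PySem.List.pySetD diag (r + k - l)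
        (PySem.List.pyGetD (PySem.List.pyGetD (sbc_base r) k []) (r + k - l) none))
      ((PySem.List.pyRange 0 (r - l) 1).foldl
        (fun diag k => PySem.List.pySetD diag k
          (PySem.List.pyGetD (PySem.List.pyGetD (sbc_base r) k []) (l + k) none))
        (PySem.List.pyRepeat [(none : Option Int)] r))
    = rmap r.toNat (fun p => some (pvPair (p : Int) (PySem.Int.mod ((p : Int) + l) r))) := by
  have hr : (0 : Int) < r := by omega
  rw [base_eq, PySem.List.pyRepeat_singleton, ← rmap_const]
  simp only [pyRange_zero_cast, foldl_rmap]
  rw [fillGen r.toNat (r - l).toNat 0 (by omega) _ _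
      (fun k => some (pvPair (k : Int) (l + (k : Int))))
      (by
        intro acc k hk
        have hk' : (k : Int) < r - l := by omega
        rw [getm _ _ k (by omega)]
        rw [get_rmapI _ _ (l + (k : Int)) (by omega) (by omega)]
        rw [if_neg (by omega)]
        rw [show (((l + (k : Int)).toNat : Nat) : Int) = l + (k : Int) from by omega]
        simp)]
  rw [fillGen r.toNat l.toNat (r - l).toNat (by omega) _ _
      (fun k => some (pvPair (k : Int) (r + (k : Int) - l)))
      (by
        intro acc k hk
        have hk' : (k : Int) < l := by omega
        rw [getm _ _ k (by omega)]
        rw [get_rmapI _ _ (r + (k : Int) - l) (by omega) (by omega)]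
        rw [if_neg (by omega)]
        rw [show (((r + (k : Int) - l).toNat : Nat) : Int) = r + (k : Int) - l from by omega]
        rw [show ((((r - l).toNat : Nat) : Int) + (k : Int)) = r + (k : Int) - l from by omega])]
  apply rmap_congr
  intro x hx
  by_cases hlo : x < (r - l).toNat
  · rw [if_neg (by omega), if_pos (by omega)]
    rw [pvmod_lo _ _ (by omega) (by omega)]
    congr 2
    all_goals omega
  · rw [if_pos (by omega)]
    rw [pvmod_hi _ _ (by omega) (by omega)]
    rw [pvPair_comm]
    congr 2
    · omega
    · omega

theorem diagFill (N m : Nat) (hm : m ≤ N) (F : Nat → Nat → Option Int) (d : List (Option Int)) :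
    (List.range m).foldl (fun res (k : Nat) =>
        PySem.List.pySetD res (k : Int)
          (PySem.List.pySetD (PySem.List.pyGetD res (k : Int) []) (k : Int)
            (PySem.List.pyGetD d (k : Int) none)))
      (pvMat N F)
    = pvMat N (fun x y => if x = y ∧ x < m then PySem.List.pyGetD d (x : Int) none else F x y) := by
  induction m generalizing F with
  | zero =>
    simp only [List.range_zero, List.foldl_nil]
    apply pvMat_congr; intro x hx y hy; rw [if_neg (by omega)]
  | succ m ih =>
    rw [List.range_succ, List.foldl_append, ih (by omega)]
    simp only [List.foldl_cons, List.foldl_nil]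
    rw [setm N _ m m (by omega)]
    apply pvMat_congr
    intro x hx y hy
    by_cases h1 : x = m ∧ y = m
    · rw [if_pos h1, if_pos (by omega)]
      rw [h1.1]
    · rw [if_neg h1]
      by_cases h2 : x = y ∧ x < m
      · rw [if_pos h2, if_pos (by omega)]
      · rw [if_neg h2, if_neg (by omega)]

theorem patternEq (r : Int) (d : List (Option Int)) :
    (PySem.List.pyRange 0 r 1).foldl (fun res k =>
        PySem.List.pySetD res k
          (PySem.List.pySetD (PySem.List.pyGetD res k []) k (PySem.List.pyGetD d k none)))
      (sbc_base r)
    = rmap r.toNat (fun i => rmap r.toNat (fun j =>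
        if ((i : Int) == (j : Int)) then PySem.List.pyGetD d (i : Int) none
        else some (pvPair (i : Int) (j : Int)))) := by
  rw [base_eq]
  simp only [pyRange_zero_cast, foldl_rmap]
  rw [diagFill r.toNat r.toNat le_rfl]
  apply pvMat_congr
  intro x hx y hy
  by_cases h : x = y
  · subst h
    rw [if_pos ⟨rfl, hx⟩, if_pos (by simp)]
  · rw [if_neg (by simp [h]), if_neg (by omega)]
    rw [if_neg (by simp [h])]

-- pattern over an explicitly-valued diagonal row
theorem pattern_rmap (r : Int) (v : Nat → Int) :
    (PySem.List.pyRange 0 r 1).foldl (fun res k =>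
        PySem.List.pySetD res k
          (PySem.List.pySetD (PySem.List.pyGetD res k []) k
            (PySem.List.pyGetD (rmap r.toNat (fun p => some (v p))) k none)))
      (sbc_base r)
    = rmap r.toNat (fun i => rmap r.toNat (fun j =>
        if i = j then some (v i) else some (pvPair (i : Int) (j : Int)))) := by
  rw [patternEq]
  apply rmap_congr
  intro i hi
  apply rmap_congr
  intro j hj
  by_cases h : i = j
  · subst h
    rw [if_pos (by simp), if_pos rfl, get_rmap _ _ i hi]
  · rw [if_neg (by simp [h]), if_neg h]

def dvalRow (r o : Int) : List (Option Int) :=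
  rmap r.toNat (fun p => some (pvPair (p : Int) (PySem.Int.mod ((p : Int) + o) r)))

theorem halfFacts (r : Int) (hr : 1 ≤ r) :
    0 ≤ PySem.Int.floordiv (r - 1) 2 ∧ PySem.Int.floordiv (r - 1) 2 ≤ r - 1 := by
  rw [PySem.Int.floordiv_eq_ediv_of_pos (by norm_num)]
  omega

theorem A_diags_eq (r : Int) (hr : 1 ≤ r) :
    List.foldl
      (fun diags l =>
        diags ++
          [List.foldl
              (fun diag k =>
                PySem.List.pySetD diag (r + k - l)
                  (PySem.List.pyGetD (PySem.List.pyGetD (sbc_base r) k []) (r + k - l) none))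
              (List.foldl
                (fun diag k =>
                  PySem.List.pySetD diag k
                    (PySem.List.pyGetD (PySem.List.pyGetD (sbc_base r) k []) (l + k) none))
                (PySem.List.pyRepeat [none] r) (PySem.List.pyRange 0 (r - l) 1))
              (PySem.List.pyRange 0 l 1)])
      [] (PySem.List.pyRange 1 (1 + PySem.Int.floordiv (r - 1) 2) 1)
    = rmap (PySem.Int.floordiv (r - 1) 2).toNat (fun t => dvalRow r (1 + (t : Int))) := by
  rw [PySem.List.foldl_append_singleton_eq_map]
  rw [List.nil_append]
  rw [pyRange_cast, map_rmap]
  rw [show (1 + PySem.Int.floordiv (r - 1) 2 - 1) = PySem.Int.floordiv (r - 1) 2 from by ring]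
  apply rmap_congr
  intro t ht
  have hh := halfFacts r hr
  have ht' : (t : Int) < PySem.Int.floordiv (r - 1) 2 := by omega
  rw [diagA_eq r (1 + (t : Int)) (by omega) (by omega)]
  rfl

theorem take_rmap {α : Type} (n m : Nat) (f : Nat → α) :
    (rmap n f).take m = rmap (min m n) f := by
  rw [rmap, ← List.map_take, List.take_range]
  rfl

theorem drop_rmap {α : Type} (n m : Nat) (f : Nat → α) :
    (rmap n f).drop m = rmap (n - m) (fun k => f (m + k)) := by
  by_cases h : m ≤ n
  · have : n = m + (n - m) := by omega
    rw [this, rmap]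
    rw [List.range_add, List.map_append, List.drop_append_of_le_length (by simp)]
    rw [List.drop_of_length_le (by simp)]
    simp [rmap, List.map_map]
  · rw [List.drop_of_length_le (by simp [length_rmap]; omega)]
    rw [show n - m = 0 from by omega]
    rfl

theorem bonus_eq (r l : Int) (hl1 : 1 ≤ l) (hl2 : 2 * l = r) :
    List.foldl
      (fun b k =>
        PySem.List.pySetD b k
          (PySem.List.pyGetD (PySem.List.pyGetD (sbc_base r) k []) (l + k) none))
      (PySem.List.pyRepeat [none] l) (PySem.List.pyRange 0 l 1)
    = rmap l.toNat (fun k => some (pvPair (k : Int) (l + (k : Int)))) := by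
  rw [base_eq, PySem.List.pyRepeat_singleton, ← rmap_const]
  simp only [pyRange_zero_cast, foldl_rmap]
  rw [fillGen l.toNat l.toNat 0 (by omega) _ _
      (fun k => some (pvPair (k : Int) (l + (k : Int))))
      (by
        intro acc k hk
        have hk' : (k : Int) < l := by omega
        rw [getm _ _ k (by omega)]
        rw [get_rmapI _ _ (l + (k : Int)) (by omega) (by omega)]
        rw [if_neg (by omega)]
        rw [show (((l + (k : Int)).toNat : Nat) : Int) = l + (k : Int) from by omega]
        simp)]
  apply rmap_congr
  intro x hx
  rw [if_pos (by omega)]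
  congr 2

def itemRow (r l i : Int) : List (Option Int) :=
  rmap l.toNat (fun p => some (pvPair (p : Int) (PySem.Int.mod ((p : Int) + (if i = 0 then l else i)) r)))
  ++ rmap (r - l).toNat (fun p => some (pvPair (l + (p : Int)) (PySem.Int.mod (l + (p : Int) + (i + 1)) r)))

theorem zipExtra (r l : Int) (Hn : Nat) (hl1 : 1 ≤ l) (hl2 : 2 * l = r) (hHn : (Hn : Int) = l - 1) :
    (((rmap l.toNat (fun k => some (pvPair (k : Int) (l + (k : Int)))))
        :: (rmap Hn (fun t => (dvalRow r (1 + (t : Int))).take l.toNat))).zip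
      ((rmap Hn (fun t => (dvalRow r (1 + (t : Int))).drop l.toNat))
        ++ [rmap l.toNat (fun k => some (pvPair (k : Int) (l + (k : Int))))])).map
      (fun ab => ab.1 ++ ab.2)
    = rmap (Hn + 1) (fun i => itemRow r l (i : Int)) := by
  have hr : (0 : Int) < r := by omega
  have hln : (l.toNat : Int) = l := by omega
  have hN : r.toNat = l.toNat + (r - l).toNat := by omega
  apply List.ext_getElem
  · simp [length_rmap, List.length_zip, List.length_append]
  · intro k h1 h2
    simp only [List.getElem_map, List.getElem_zip]
    rw [getElem_rmap _ _ k h2]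
    have hk : k < Hn + 1 := by simpa [length_rmap] using h2
    have hleft : ((rmap l.toNat (fun k => some (pvPair (k : Int) (l + (k : Int)))))
        :: (rmap Hn (fun t => (dvalRow r (1 + (t : Int))).take l.toNat)))[k]'(by
          simp [length_rmap]; omega)
        = rmap l.toNat (fun p => some (pvPair (p : Int)
            (PySem.Int.mod ((p : Int) + (if (k : Int) = 0 then l else (k : Int))) r))) := by
      match k, hk with
      | 0, _ =>
        simp only [List.getElem_cons_zero]
        apply rmap_congr
        intro p hp
        rw [if_pos (by norm_num), pvmod_lo _ _ (by omega) (by omega)]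
        congr 2
        omega
      | (j+1), hjk =>
        simp only [List.getElem_cons_succ]
        rw [getElem_rmap _ _ j (by simp [length_rmap]; omega)]
        unfold dvalRow
        rw [take_rmap, show min l.toNat r.toNat = l.toNat from by omega]
        apply rmap_congr
        intro p hp
        rw [if_neg (by omega)]
        congr 3
        push_cast
        ring
    have hright : ((rmap Hn (fun t => (dvalRow r (1 + (t : Int))).drop l.toNat))
        ++ [rmap l.toNat (fun k => some (pvPair (k : Int) (l + (k : Int))))])[k]'(by
          simp [length_rmap]; omega)
        = rmap (r - l).toNat (fun p => some (pvPair (l + (p : Int))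
            (PySem.Int.mod (l + (p : Int) + ((k : Int) + 1)) r))) := by
      by_cases hkH : k < Hn
      · rw [List.getElem_append_left (by simp [length_rmap]; omega)]
        rw [getElem_rmap _ _ k (by simp [length_rmap]; omega)]
        unfold dvalRow
        rw [drop_rmap, show r.toNat - l.toNat = (r - l).toNat from by omega]
        apply rmap_congr
        intro p hp
        congr 2
        · omega
        · congr 1
          omega
      · have hkeq : k = Hn := by omega
        subst hkeq
        rw [List.getElem_append_right (by simp [length_rmap])]
        simp only [length_rmap]
        rw [List.getElem_singleton]
        rw [show (r - l).toNat = l.toNat from by omega]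
        apply rmap_congr
        intro p hp
        rw [show l + (p : Int) + ((k : Int) + 1) = r + (p : Int) from by omega]
        rw [pvmod_hi _ _ (by omega) (by omega)]
        rw [pvPair_comm]
        congr 2
        omega
    rw [hleft, hright]
    rfl

-- B's pair expression is pvPair
theorem pairB (p q : Int) :
    PySem.Int.floordiv ((if p > q then (p, q) else (q, p)).1 * ((if p > q then (p, q) else (q, p)).1 - 1)) 2
      + (if p > q then (p, q) else (q, p)).2 = pvPair p q := by
  unfold pvPair
  rcases lt_or_ge q p with h | h
  · rw [if_pos h, max_eq_left h.le, min_eq_right h.le]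
  · rw [if_neg (not_lt.mpr h), max_eq_right h, min_eq_left h]

-- B normal form: a triple rmap of closed-form entries
theorem B_eq (r : Int) :
    sbc_extended_alt r =
      rmap (if PySem.Int.mod r 2 == 0 then
              max (PySem.Int.floordiv (r - 1) 2) 0 + (max (PySem.Int.floordiv (r - 1) 2) 0 + 1)
            else max (PySem.Int.floordiv (r - 1) 2) 0).toNat
        (fun m => rmap r.toNat (fun i => rmap r.toNat (fun j =>
          if i = j then
            some (pvPair (i : Int) (PySem.Int.mod ((i : Int) + pvOff r (m : Int) (i : Int)) r))
          else some (pvPair (i : Int) (j : Int))))) := by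
  simp only [sbc_extended_alt, pyRange_zero_cast, map_rmap]
  apply rmap_congr
  intro m hm
  apply rmap_congr
  intro i hi
  apply rmap_congr
  intro j hj
  by_cases h : i = j
  · subst h
    rw [if_pos rfl]
    have hcond : (((i : Int)) == ((i : Int))) = true := by simp
    rw [hcond]
    simp only [if_true, pairB, pvOff]
  · rw [if_neg h]
    have hcond : (((i : Int)) == ((j : Int))) = false := by simp [h]
    rw [hcond]
    simp only [Bool.false_eq_true, if_false, pairB]

-- a plain diagonal row is a pvOff row (m below half)
theorem dvalRow_off (r : Int) (m : Nat) (hm : (m : Int) < PySem.Int.floordiv (r - 1) 2) :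
    dvalRow r (1 + (m : Int))
      = rmap r.toNat (fun p => some (pvPair (p : Int)
          (PySem.Int.mod ((p : Int) + pvOff r (m : Int) (p : Int)) r))) := by
  unfold dvalRow
  apply rmap_congr
  intro p hp
  have hoff : pvOff r (m : Int) (p : Int) = (m : Int) + 1 := by
    unfold pvOff
    rw [if_pos hm]
  rw [hoff]
  congr 3
  ring

-- a spliced diagonal row is a pvOff row (m at or above half)
theorem itemRow_off (r l : Int) (H t : Nat) (hl1 : 1 ≤ l) (hl2 : 2 * l = r)
    (hH : ((H : Nat) : Int) = PySem.Int.floordiv (r - 1) 2) :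
    itemRow r l (t : Int)
      = rmap r.toNat (fun p => some (pvPair (p : Int)
          (PySem.Int.mod ((p : Int) + pvOff r ((H : Int) + (t : Int)) (p : Int)) r))) := by
  have hfl : PySem.Int.floordiv r 2 = l := by
    rw [PySem.Int.floordiv_eq_ediv_of_pos (by norm_num)]
    omega
  have hN : r.toNat = l.toNat + (r - l).toNat := by omega
  rw [hN, rmap_append]
  unfold itemRow
  congr 1
  · apply rmap_congr
    intro p hp
    have hp' : (p : Int) < l := by omega
    have hoff : pvOff r ((H : Int) + (t : Int)) (p : Int)
        = (if (t : Int) = 0 then l else (t : Int)) := by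
      unfold pvOff
      simp only [beq_iff_eq, hfl, ← hH]
      rcases eq_or_ne (t : Int) 0 with h | h
      · rw [if_neg (by omega), if_pos hp', if_pos (by omega), if_pos h]
      · rw [if_neg (by omega), if_pos hp', if_neg (by omega), if_neg h]
        omega
    rw [hoff]
  · apply rmap_congr
    intro p hp
    have hc : ((l.toNat + p : Nat) : Int) = l + (p : Int) := by push_cast; omega
    rw [hc]
    have hoff : pvOff r ((H : Int) + (t : Int)) (l + (p : Int)) = (t : Int) + 1 := by
      unfold pvOff
      simp only [beq_iff_eq, hfl, ← hH]
      rw [if_neg (by omega), if_neg (by omega)]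
      omega
    rw [hoff]

-- ===== VERDICT (by name: the statement is the Claim_ definition above) =====
theorem sbc_extended_spec : Claim_equal_sbc_extended := by
  intro r _
  unfold Spec_sbc_extended
  rw [B_eq]
  by_cases hr : 1 ≤ r
  · have hh := halfFacts r hr
    have hmax : max (PySem.Int.floordiv (r - 1) 2) 0 = PySem.Int.floordiv (r - 1) 2 :=
      max_eq_left hh.1
    obtain ⟨H, hHdef⟩ : ∃ H, (PySem.Int.floordiv (r - 1) 2).toNat = H := ⟨_, rfl⟩
    have hHI : ((H : Nat) : Int) = PySem.Int.floordiv (r - 1) 2 := by omega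
    simp only [sbc_extended]
    rw [A_diags_eq r hr, hHdef, hmax]
    by_cases hpar : PySem.Int.mod r 2 = 0
    · have hcond : (PySem.Int.mod r 2 == 0) = true := by rw [hpar]; rfl
      rw [if_pos hcond, if_pos hcond]
      have hpar' : r % 2 = 0 := by
        rw [PySem.Int.mod_eq_emod_of_pos (by norm_num)] at hpar; exact hpar
      obtain ⟨l, hldef⟩ : ∃ l, PySem.Int.floordiv r 2 = l := ⟨_, rfl⟩
      have hlval : l = r / 2 := by
        rw [← hldef, PySem.Int.floordiv_eq_ediv_of_pos (by norm_num)]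
      have hl1 : 1 ≤ l := by omega
      have hl2 : 2 * l = r := by omega
      have hHn : (H : Int) = l - 1 := by
        rw [hHI, PySem.Int.floordiv_eq_ediv_of_pos (by norm_num)]; omega
      rw [hldef]
      rw [bonus_eq r l hl1 hl2]
      have hsliceL : (rmap H (fun t => dvalRow r (1 + (t : Int)))).map
          (fun d => PySem.List.slice d none (some l))
          = rmap H (fun t => (dvalRow r (1 + (t : Int))).take l.toNat) := by
        rw [map_rmap]
        apply rmap_congr
        intro t ht
        exact PySem.List.slice_to _ (by omega)
      have hsliceR : (rmap H (fun t => dvalRow r (1 + (t : Int)))).map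
          (fun d => PySem.List.slice d (some l) none)
          = rmap H (fun t => (dvalRow r (1 + (t : Int))).drop l.toNat) := by
        rw [map_rmap]
        apply rmap_congr
        intro t ht
        exact PySem.List.slice_from _ (by omega)
      rw [hsliceL, hsliceR]
      simp only [List.singleton_append]
      rw [zipExtra r l H hl1 hl2 hHn]
      rw [show (PySem.Int.floordiv (r - 1) 2 + (PySem.Int.floordiv (r - 1) 2 + 1)).toNat
            = H + (H + 1) from by omega]
      rw [rmap_append H (H + 1)]
      rw [List.map_append, map_rmap, map_rmap]
      congr 1
      · apply rmap_congr
        intro m hm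
        rw [show dvalRow r (1 + (m : Int))
              = rmap r.toNat (fun p => some (pvPair (p : Int)
                  (PySem.Int.mod ((p : Int) + pvOff r (m : Int) (p : Int)) r))) from
            dvalRow_off r m (by omega)]
        rw [pattern_rmap]
      · apply rmap_congr
        intro t ht
        rw [itemRow_off r l H t hl1 hl2 hHI]
        rw [pattern_rmap]
        apply rmap_congr
        intro i hi
        apply rmap_congr
        intro j hj
        by_cases h : i = j
        · subst h
          rw [if_pos rfl, if_pos rfl, Nat.cast_add]
        · rw [if_neg h, if_neg h]
    · have hcond : ¬ ((PySem.Int.mod r 2 == 0) = true) := by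
        simp only [beq_iff_eq]; exact hpar
      rw [if_neg hcond, if_neg hcond]
      rw [show (PySem.Int.floordiv (r - 1) 2).toNat = H from hHdef]
      rw [map_rmap]
      apply rmap_congr
      intro m hm
      rw [show dvalRow r (1 + (m : Int))
            = rmap r.toNat (fun p => some (pvPair (p : Int)
                (PySem.Int.mod ((p : Int) + pvOff r (m : Int) (p : Int)) r))) from
          dvalRow_off r m (by omega)]
      rw [pattern_rmap]
  · -- r ≤ 0: A returns [[]] for even r and [] for odd r, and so does B
    have h0 : PySem.List.pyRange 0 r 1 = [] := PySem.List.pyRange_one_eq_nil (by omega)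
    have hhalf : PySem.Int.floordiv (r - 1) 2 ≤ 0 := by
      rw [PySem.Int.floordiv_eq_ediv_of_pos (by norm_num)]; omega
    have hmax : max (PySem.Int.floordiv (r - 1) 2) 0 = 0 := max_eq_right hhalf
    have hl0 : PySem.Int.floordiv r 2 ≤ 0 := by
      rw [PySem.Int.floordiv_eq_ediv_of_pos (by norm_num)]; omega
    have hlr : r ≤ PySem.Int.floordiv r 2 := by
      rw [PySem.Int.floordiv_eq_ediv_of_pos (by norm_num)]; omega
    have h1 : PySem.List.pyRange 1 (1 + PySem.Int.floordiv (r - 1) 2) 1 = [] :=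
      PySem.List.pyRange_one_eq_nil (by omega)
    have h2 : PySem.List.pyRange 0 (PySem.Int.floordiv r 2) 1 = [] :=
      PySem.List.pyRange_one_eq_nil (by omega)
    have h4 : PySem.List.pyRepeat [(none : Option Int)] (PySem.Int.floordiv r 2) = [] := by
      rw [PySem.List.pyRepeat_singleton, show (PySem.Int.floordiv r 2).toNat = 0 from by omega]
      rfl
    have hbase : sbc_base r = [] := by
      rw [base_eq, show r.toNat = 0 from by omega]
      rfl
    have hrn : r.toNat = 0 := by omega
    simp only [sbc_extended, h0, h1, h2, h4, hbase, hmax, hrn,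
      List.foldl_nil, List.map_nil, List.nil_append, List.append_nil]
    by_cases hpar : PySem.Int.mod r 2 = 0
    · have hcond : (PySem.Int.mod r 2 == 0) = true := by rw [hpar]; rfl
      rw [if_pos hcond, if_pos hcond]
      simp [List.zip, rmap]
    · have hcond : ¬ ((PySem.Int.mod r 2 == 0) = true) := by
        simp only [beq_iff_eq]; exact hpar
      rw [if_neg hcond, if_neg hcond]
      rfl
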